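-- pv_equiv track=rewrite | github.com/ThePickleGawd/EmToM | emtom/pddl/planner.py | pick_agent_for_targets
-- ===== SOURCE A (Python) =====
-- from typing import Any, Dict, List, Optional, Tuple
--
-- def _agent_sort_key(agent_id: str, agent_loads: Dict[str, int]) -> tuple:
--     """Stable deterministic tie-breaker: (load, numeric agent index)."""
--     try:
--         idx = int(agent_id.split("_", 1)[1])
--     except Exception:
--         idx = 0
--     return (agent_loads.get(agent_id, 0), idx)
--
-- def _resolve_target_room(
--     target_id: str,
--     target_to_room: Dict[str, str],
--     restrictions: Dict[str, set],
-- ) -> Optional[str]: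
--     """Resolve target_id to its room, checking restriction maps as fallback."""
--     room = target_to_room.get(target_id)
--     if room is not None:
--         return room
--     if restrictions:
--         restricted_rooms = {
--             r for rooms in restrictions.values() for r in rooms if isinstance(r, str)
--         }
--         if target_id in restricted_rooms:
--             return target_id
--     return None
--
-- def _feasible_agents(
--     target_rooms: List[Optional[str]],
--     num_agents: int,
--     restrictions: Dict[str, set],
-- ) -> List[str]:
--     """Return agents that can reach ALL of the given rooms."""
--     feasible: List[str] = []
--     for i in range(max(1, num_agents)):
--         agent_id = f"agent_{i}"
--         agent_restricted = restrictions.get(agent_id, set())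
--         if all(
--             room is None or room not in agent_restricted
--             for room in target_rooms
--         ):
--             feasible.append(agent_id)
--     return feasible
--
-- def pick_agent_for_targets(
--     target_ids: List[str],
--     num_agents: int,
--     target_to_room: Dict[str, str],
--     restrictions: Dict[str, set],
--     agent_loads: Optional[Dict[str, int]] = None,
-- ) -> Optional[str]:
--     """Pick an agent that can reach ALL targets. Returns None if impossible."""
--     target_rooms = [
--         _resolve_target_room(tid, target_to_room, restrictions)
--         for tid in target_ids
--     ]
--     feasible = _feasible_agents(target_rooms, num_agents, restrictions)
--     if not feasible:
--         return None
--     if not agent_loads: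
--         return feasible[0]
--     feasible.sort(key=lambda a: _agent_sort_key(a, agent_loads))
--     return feasible[0]
-- ===== SOURCE B (Python) =====
-- from typing import Dict, List, Optional
--
-- def _agent_sort_key(agent_id: str, agent_loads: Dict[str, int]) -> tuple:
--     """Stable deterministic tie-breaker: (load, numeric agent index)."""
--     try:
--         idx = int(agent_id.split("_", 1)[1])
--     except Exception:
--         idx = 0
--     return (agent_loads.get(agent_id, 0), idx)
--
-- def pick_agent_for_targets(
--     target_ids: List[str],
--     num_agents: int,
--     target_to_room: Dict[str, str],
--     restrictions: Dict[str, set],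
--     agent_loads: Optional[Dict[str, int]] = None,
-- ) -> Optional[str]:
--     """Pick an agent that can reach ALL targets, in one pass over the agents.
--
--     Resolves the restricted-rooms fallback set ONCE (A rebuilds it per target)
--     and replaces A's build-filter-sort-head pipeline with a single running
--     argmin over (load, index); with no loads it returns the first feasible
--     agent immediately.
--     """
--     restricted_rooms = {
--         r for rooms in restrictions.values() for r in rooms if isinstance(r, str)
--     }
--     target_rooms = [
--         target_to_room.get(tid, tid if tid in restricted_rooms else None)
--         for tid in target_ids
--     ]
--     best = None  # (key, agent_id)
--     for i in range(max(1, num_agents)):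
--         agent_id = f"agent_{i}"
--         blocked = restrictions.get(agent_id, set())
--         if any(room is not None and room in blocked for room in target_rooms):
--             continue
--         if not agent_loads:
--             return agent_id
--         key = _agent_sort_key(agent_id, agent_loads)
--         if best is None or key < best[0]:
--             best = (key, agent_id)
--     return best[1] if best is not None else None
-- ===== Notes on version B (the rewrite author's own statement) =====
-- stated objective: faster
-- what changed: B resolves the restricted-rooms fallback set once instead of rebuilding it per target and replaces A's build-feasible-list / sort-by-(load,index) / take-head pipeline with a single pass over the agents keeping a running argmin (returning the first feasible agent immediately when there are no loads).
import Mathlib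
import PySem

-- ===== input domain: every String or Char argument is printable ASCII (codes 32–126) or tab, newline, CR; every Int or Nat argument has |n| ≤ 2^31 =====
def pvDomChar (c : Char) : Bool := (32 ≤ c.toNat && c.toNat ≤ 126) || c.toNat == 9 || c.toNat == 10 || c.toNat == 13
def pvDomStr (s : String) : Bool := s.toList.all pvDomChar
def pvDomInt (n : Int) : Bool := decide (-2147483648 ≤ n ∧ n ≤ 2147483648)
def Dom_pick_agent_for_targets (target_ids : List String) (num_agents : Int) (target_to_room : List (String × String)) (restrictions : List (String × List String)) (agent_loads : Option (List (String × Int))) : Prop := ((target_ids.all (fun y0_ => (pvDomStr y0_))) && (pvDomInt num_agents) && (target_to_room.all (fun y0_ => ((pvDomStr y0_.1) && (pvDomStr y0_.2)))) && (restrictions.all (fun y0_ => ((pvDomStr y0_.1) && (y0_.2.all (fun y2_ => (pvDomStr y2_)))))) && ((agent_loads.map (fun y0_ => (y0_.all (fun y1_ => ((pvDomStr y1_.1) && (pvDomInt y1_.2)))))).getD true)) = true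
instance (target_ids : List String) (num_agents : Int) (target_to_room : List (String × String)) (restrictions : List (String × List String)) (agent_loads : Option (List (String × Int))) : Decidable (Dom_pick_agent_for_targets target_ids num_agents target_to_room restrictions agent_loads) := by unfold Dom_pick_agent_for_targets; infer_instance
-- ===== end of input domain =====

-- Faster B: resolves the restricted-rooms fallback set once (A rebuilds it per target) and picks
-- the agent in a single running-argmin pass instead of A's build-feasible-list / stable-sort / take-head pipeline.


-- ===== PORT A =====
-- _agent_sort_key: (load, numeric agent index), the try/except yielding 0 on failure
def agent_sort_key (agent_id : String) (agent_loads : List (String × Int)) : Int × Int :=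
  let idx : Int :=
    match PySem.Str.splitMax? agent_id "_" 1 with
    | none => 0
    | some parts =>
      match PySem.List.pyGet? parts 1 with
      | none => 0          -- IndexError → except → 0
      | some s =>
        match PySem.Int.ofStr? s with
        | none => 0        -- ValueError → except → 0
        | some v => v
  ((agent_loads.lookup agent_id).getD 0, idx)

-- _resolve_target_room
def resolve_target_room (target_id : String) (target_to_room : List (String × String))
    (restrictions : List (String × List String)) : Option String :=
  match target_to_room.lookup target_id with
  | some room => some room
  | none =>
    if restrictions ≠ [] then
      let restricted_rooms := PySem.Set.ofList (restrictions.flatMap (fun p => p.2))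
      if restricted_rooms.contains target_id then some target_id else none
    else none

-- _feasible_agents
def feasible_agents (target_rooms : List (Option String)) (num_agents : Int)
    (restrictions : List (String × List String)) : List String :=
  (PySem.List.pyRange 0 (max 1 num_agents) 1).foldl
    (fun acc i =>
      let agent_id := "agent_" ++ PySem.Int.toStr i
      let agent_restricted := (restrictions.lookup agent_id).getD []
      if target_rooms.all (fun room =>
            match room with
            | none => true
            | some r => !(agent_restricted.contains r)) then
        acc ++ [agent_id]
      else acc) []

def pick_agent_for_targets (target_ids : List String) (num_agents : Int) (target_to_room : List (String × String)) (restrictions : List (String × List String)) (agent_loads : Option (List (String × Int))) : Option String :=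
  let target_rooms := target_ids.map (fun tid => resolve_target_room tid target_to_room restrictions)
  let feasible := feasible_agents target_rooms num_agents restrictions
  if feasible = [] then none
  else
    match agent_loads with
    | none => PySem.List.pyGet? feasible 0
    | some loads =>
      if loads = [] then PySem.List.pyGet? feasible 0
      else
        PySem.List.pyGet?
          (PySem.List.sorted2 feasible
            (fun a => (agent_sort_key a loads).1) (fun a => (agent_sort_key a loads).2)) 0

-- ===== PORT B =====
-- the single-pass loop of Source B: best = (key, agent_id) running argmin; early return when no loads
def pick_loop (target_rooms : List (Option String)) (restrictions : List (String × List String))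
    (agent_loads : Option (List (String × Int))) (idxs : List Int)
    (best : Option ((Int × Int) × String)) : Option String :=
  match idxs with
  | [] => best.map (fun b => b.2)
  | i :: rest =>
    let agent_id := "agent_" ++ PySem.Int.toStr i
    let blocked := (restrictions.lookup agent_id).getD []
    if target_rooms.any (fun room =>
          match room with
          | none => false
          | some r => blocked.contains r) then
      pick_loop target_rooms restrictions agent_loads rest best
    else
      match agent_loads with
      | none => some agent_id
      | some [] => some agent_id
      | some loads =>
        let key := agent_sort_key agent_id loads
        let best' :=
          match best with
          | none => some (key, agent_id)
          | some b =>
            if key.1 < b.1.1 || (key.1 == b.1.1 && key.2 < b.1.2) then some (key, agent_id)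
            else some b
        pick_loop target_rooms restrictions agent_loads rest best'

def pick_agent_for_targets_alt (target_ids : List String) (num_agents : Int) (target_to_room : List (String × String)) (restrictions : List (String × List String)) (agent_loads : Option (List (String × Int))) : Option String :=
  let restricted_rooms := PySem.Set.ofList (restrictions.flatMap (fun p => p.2))
  let target_rooms := target_ids.map (fun tid =>
    match target_to_room.lookup tid with
    | some room => some room
    | none => if restricted_rooms.contains tid then some tid else none)
  pick_loop target_rooms restrictions agent_loads
    (PySem.List.pyRange 0 (max 1 num_agents) 1) none

-- ===== PRECONDITION & SPEC =====
def Spec_pick_agent_for_targets (target_ids : List String) (num_agents : Int) (target_to_room : List (String × String)) (restrictions : List (String × List String)) (agent_loads : Option (List (String × Int))) (out : Option String) : Prop := out = pick_agent_for_targets_alt target_ids num_agents target_to_room restrictions agent_loads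
instance (target_ids : List String) (num_agents : Int) (target_to_room : List (String × String)) (restrictions : List (String × List String)) (agent_loads : Option (List (String × Int))) (out : Option String) : Decidable (Spec_pick_agent_for_targets target_ids num_agents target_to_room restrictions agent_loads out) := by unfold Spec_pick_agent_for_targets; infer_instance

-- ===== CLAIM (what is proved, stated in full; the proofs are below) =====
def Claim_equal_pick_agent_for_targets : Prop := ∀ (target_ids : List String) (num_agents : Int) (target_to_room : List (String × String)) (restrictions : List (String × List String)) (agent_loads : Option (List (String × Int))), Dom_pick_agent_for_targets target_ids num_agents target_to_room restrictions agent_loads → Spec_pick_agent_for_targets target_ids num_agents target_to_room restrictions agent_loads (pick_agent_for_targets target_ids num_agents target_to_room restrictions agent_loads)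


-- ===== LEMMAS AND PROOFS =====
-- proof-only abbreviations
def pvName (i : Int) : String := "agent_" ++ PySem.Int.toStr i

def pvOk (rooms : List (Option String)) (rs : List (String × List String)) (i : Int) : Bool :=
  rooms.all (fun room =>
    match room with
    | none => true
    | some r => !(((rs.lookup (pvName i)).getD []).contains r))

def pvStep (k1 k2 : String → Int) (best : Option ((Int × Int) × String)) (a : String) :
    Option ((Int × Int) × String) :=
  match best with
  | none => some ((k1 a, k2 a), a)
  | some b =>
    if k1 a < b.1.1 || (k1 a == b.1.1 && k2 a < b.1.2) then some ((k1 a, k2 a), a) else some b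

theorem pv_any_eq_not_all (rooms : List (Option String)) (bl : List String) :
    (rooms.any (fun room => match room with | none => false | some r => bl.contains r))
      = !(rooms.all (fun room => match room with | none => true | some r => !(bl.contains r))) := by
  induction rooms with
  | nil => rfl
  | cons h t ih => cases h <;> simp_all [List.any_cons, List.all_cons]

theorem pv_rooms_eq (target_ids : List String) (t2r : List (String × String))
    (rs : List (String × List String)) :
    target_ids.map (fun tid => resolve_target_room tid t2r rs)
      = target_ids.map (fun tid =>
          match t2r.lookup tid with
          | some room => some room
          | none =>
            if (PySem.Set.ofList (rs.flatMap (fun p => p.2))).contains tid then some tid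
            else none) := by
  apply List.map_congr_left
  intro tid _
  unfold resolve_target_room
  cases t2r.lookup tid with
  | some room => rfl
  | none =>
    cases rs with
    | nil => simp [PySem.Set.ofList]
    | cons p ps => simp

theorem pv_feasible_eq (rooms : List (Option String)) (n : Int)
    (rs : List (String × List String)) :
    feasible_agents rooms n rs
      = ((PySem.List.pyRange 0 (max 1 n) 1).filter (pvOk rooms rs)).map pvName := by
  unfold feasible_agents
  have := PySem.List.foldl_append_if (pvOk rooms rs) pvName
    (PySem.List.pyRange 0 (max 1 n) 1) []
  simpa [pvOk, pvName] using this

theorem pv_headcase (xs : List String) :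
    (if xs = [] then (none : Option String) else PySem.List.pyGet? xs 0) = xs.head? := by
  cases xs with
  | nil => rfl
  | cons h t => simp [PySem.List.pyGet?, PySem.List.pyIdx?]

-- the no-loads loop returns the first feasible agent
theorem pv_loop_noloads (rooms : List (Option String)) (rs : List (String × List String))
    (al : Option (List (String × Int))) (hal : al = none ∨ al = some [])
    (L : List Int) :
    pick_loop rooms rs al L none = (((L.filter (pvOk rooms rs)).map pvName).head?) := by
  induction L with
  | nil => rfl
  | cons i rest ih =>
    rw [pick_loop.eq_def]
    simp only
    rw [pv_any_eq_not_all rooms]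
    by_cases hok : pvOk rooms rs i = true
    · have hok' := hok
      simp only [pvOk, pvName] at hok'
      rw [if_neg (by rw [hok']; decide)]
      rw [List.filter_cons_of_pos hok, List.map_cons, List.head?_cons]
      rcases hal with h | h <;> subst h <;> simp [pvName]
    · rw [Bool.not_eq_true] at hok
      have hok' := hok
      simp only [pvOk, pvName] at hok'
      rw [if_pos (by rw [hok']; decide)]
      rw [ih, List.filter_cons_of_neg (by simp [hok])]

-- accumulator well-formedness: stored key is the key of the stored agent
theorem pv_fold_wf (k1 k2 : String → Int) (F : List String)
    (acc : Option ((Int × Int) × String))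
    (hacc : ∀ b, acc = some b → b.1 = (k1 b.2, k2 b.2)) :
    ∀ b, F.foldl (pvStep k1 k2) acc = some b → b.1 = (k1 b.2, k2 b.2) := by
  induction F generalizing acc with
  | nil => simpa using hacc
  | cons a t ih =>
    simp only [List.foldl_cons]
    apply ih
    intro b hb
    unfold pvStep at hb
    rcases hacc' : acc with _ | b0
    · rw [hacc'] at hb; simp at hb; simp [← hb]
    · rw [hacc'] at hb
      simp only at hb
      split at hb
      · simp at hb; simp [← hb]
      · simp at hb; subst hb; exact hacc b0 hacc'

theorem pv_sorted2_append (F : List String) (x : String) (k1 k2 : String → Int) :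
    PySem.List.sorted2 (F ++ [x]) k1 k2
      = PySem.List.insertBy
          (fun a b => decide (k1 a < k1 b) || (!decide (k1 b < k1 a) && decide (k2 a < k2 b)))
          x (PySem.List.sorted2 F k1 k2) := by
  simp [PySem.List.sorted2, List.foldl_append]

-- head of the stable lexicographic sort = running strict-argmin over the list
theorem pv_head_sorted2 (k1 k2 : String → Int) (F : List String) :
    (PySem.List.sorted2 F k1 k2).head?
      = (F.foldl (pvStep k1 k2) none).map (fun b => b.2) := by
  induction F using List.reverseRecOn with
  | nil => rfl
  | append_singleton F x ih =>
    rw [pv_sorted2_append, List.foldl_append]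
    rcases hs : PySem.List.sorted2 F k1 k2 with _ | ⟨h, t⟩
    · have hF : F = [] := by
        have := PySem.List.sorted2_perm F k1 k2 false
        rw [hs] at this
        exact this.symm.eq_nil
      subst hF
      simp [PySem.List.insertBy, pvStep]
    · rw [hs] at ih
      simp only [List.head?_cons] at ih
      rcases hb : F.foldl (pvStep k1 k2) none with _ | b
      · rw [hb] at ih; simp at ih
      · rw [hb] at ih
        simp only [Option.map_some] at ih
        have hwf : b.1 = (k1 b.2, k2 b.2) :=
          pv_fold_wf k1 k2 F none (by intro b h; cases h) b hb
        have hb2 : b.2 = h := by simpa using ih.symm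
        simp only [List.foldl_cons, List.foldl_nil]
        unfold pvStep
        simp only
        rw [PySem.List.insertBy]
        have hcond : (decide (k1 x < k1 h) || (!decide (k1 h < k1 x) && decide (k2 x < k2 h)))
            = (k1 x < b.1.1 || (k1 x == b.1.1 && k2 x < b.1.2)) := by
          rw [hwf, hb2]
          rcases lt_trichotomy (k1 x) (k1 h) with h1 | h1 | h1
          · simp [h1]
          · simp [h1]
          · simp [h1, not_lt_of_gt h1, ne_of_gt h1]
        split
        · next hc =>
          rw [hcond] at hc
          rw [if_pos hc]
          rfl
        · next hc =>
          rw [hcond] at hc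
          rw [Bool.not_eq_true] at hc
          rw [hc]
          simp [hb2]

-- the loaded loop is the running argmin over the feasible agents
theorem pv_A_loads (F : List String) (k1 k2 : String → Int) :
    (if F = [] then (none : Option String)
     else PySem.List.pyGet? (PySem.List.sorted2 F k1 k2) 0)
      = (PySem.List.sorted2 F k1 k2).head? := by
  cases hF : F with
  | nil => rfl
  | cons x t =>
    rw [if_neg (List.cons_ne_nil x t)]
    rcases hs : PySem.List.sorted2 (x :: t) k1 k2 with _ | ⟨h, t'⟩
    · have := PySem.List.sorted2_perm (x :: t) k1 k2 false
      rw [hs] at this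
      exact absurd this.symm.eq_nil (List.cons_ne_nil x t)
    · simp [PySem.List.pyGet?, PySem.List.pyIdx?]

theorem pv_loop_loads (rooms : List (Option String)) (rs : List (String × List String))
    (l0 : String × Int) (ls : List (String × Int)) (L : List Int)
    (best : Option ((Int × Int) × String)) :
    pick_loop rooms rs (some (l0 :: ls)) L best
      = (((L.filter (pvOk rooms rs)).map pvName).foldl
          (pvStep (fun a => (agent_sort_key a (l0 :: ls)).1)
                  (fun a => (agent_sort_key a (l0 :: ls)).2)) best).map (fun b => b.2) := by
  induction L generalizing best with
  | nil => rfl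
  | cons i rest ih =>
    rw [pick_loop.eq_def]
    simp only
    rw [pv_any_eq_not_all rooms]
    by_cases hok : pvOk rooms rs i = true
    · have hok' := hok
      simp only [pvOk, pvName] at hok'
      rw [if_neg (by rw [hok']; decide)]
      rw [List.filter_cons_of_pos hok, List.map_cons, List.foldl_cons]
      cases best with
      | none =>
        rw [ih]
        congr 2
      | some b =>
        rw [ih]
        congr 2
    · rw [Bool.not_eq_true] at hok
      have hok' := hok
      simp only [pvOk, pvName] at hok'
      rw [if_pos (by rw [hok']; decide)]
      rw [ih, List.filter_cons_of_neg (by simp [hok])]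

-- ===== VERDICT (by name: the statement is the Claim_ definition above) =====
theorem pick_agent_for_targets_spec : Claim_equal_pick_agent_for_targets := by
  intro target_ids num_agents t2r rs al _
  unfold Spec_pick_agent_for_targets pick_agent_for_targets pick_agent_for_targets_alt
  simp only
  rw [pv_rooms_eq]
  rcases al with _ | loads
  · rw [pv_loop_noloads _ rs none (Or.inl rfl), pv_feasible_eq]
    dsimp only
    exact pv_headcase _
  · rcases loads with _ | ⟨l0, ls⟩
    · rw [pv_loop_noloads _ rs (some []) (Or.inr rfl), pv_feasible_eq]
      dsimp only
      rw [if_pos (rfl : ([] : List (String × Int)) = [])]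
      exact pv_headcase _
    · rw [pv_loop_loads, ← pv_head_sorted2, pv_feasible_eq]
      dsimp only
      rw [if_neg (List.cons_ne_nil l0 ls)]
      exact pv_A_loads _ _ _
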